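-- pv_equiv track=rewrite | github.com/dhineshram222/KG_fyp4 | backend/notes_quality_enforcer.py | _most_frequent_concept
-- ===== SOURCE A (Python) =====
-- from typing import List, Dict, Optional, Tuple
--
-- def _most_frequent_concept(words: List[str], kg_labels: set) -> str:
--     """Return the most frequent meaningful word, preferring KG labels."""
--     if not words:
--         return ""
--
--     stopwords = {
--         "which", "where", "there", "their", "these", "those",
--         "about", "using", "based", "level", "system", "data",
--         "that", "with", "from", "have", "been", "this", "into",
--     }
--     freq: Dict[str, int] = {}
--     for w in words:
--         if w not in stopwords:
--             freq[w] = freq.get(w, 0) + 1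
--
--     if not freq:
--         return ""
--
--     # Prefer words that appear in KG node labels
--     for word, count in sorted(freq.items(), key=lambda x: -x[1]):
--         if any(word in label for label in kg_labels):
--             return word.title()
--
--     # Fallback: most frequent word
--     return max(freq, key=freq.get).title()
-- ===== SOURCE B (Python) =====
-- from typing import List
--
-- def _most_frequent_concept(words: List[str], kg_labels: set) -> str:
--     """Return the most frequent meaningful word, preferring KG labels."""
--     if not words:
--         return ""
--
--     stopwords = {
--         "which", "where", "there", "their", "these", "those",
--         "about", "using", "based", "level", "system", "data",
--         "that", "with", "from", "have", "been", "this", "into",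
--     }
--     filtered = [w for w in words if w not in stopwords]
--     if not filtered:
--         return ""
--
--     freq = {}
--     for w in filtered:
--         freq[w] = freq.get(w, 0) + 1
--
--     # Words (first-occurrence order) that occur inside some KG label; else all words.
--     matching = [w for w in freq if any(w in label for label in kg_labels)]
--     pool = matching or list(freq)
--     # max returns the first maximal element, reproducing dict-order tie-breaking.
--     return max(pool, key=freq.__getitem__).title()
-- ===== Notes on version B (the rewrite author's own statement) =====
-- stated objective: simpler
-- what changed: B keeps the frequency dict but drops A's descending-frequency sort and early-exit scan, instead filtering the dict's keys by KG-label substring match and taking one max (first maximal key, same dict-order tie-breaking) over that pool or, if it is empty, over all keys.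
import Mathlib
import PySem

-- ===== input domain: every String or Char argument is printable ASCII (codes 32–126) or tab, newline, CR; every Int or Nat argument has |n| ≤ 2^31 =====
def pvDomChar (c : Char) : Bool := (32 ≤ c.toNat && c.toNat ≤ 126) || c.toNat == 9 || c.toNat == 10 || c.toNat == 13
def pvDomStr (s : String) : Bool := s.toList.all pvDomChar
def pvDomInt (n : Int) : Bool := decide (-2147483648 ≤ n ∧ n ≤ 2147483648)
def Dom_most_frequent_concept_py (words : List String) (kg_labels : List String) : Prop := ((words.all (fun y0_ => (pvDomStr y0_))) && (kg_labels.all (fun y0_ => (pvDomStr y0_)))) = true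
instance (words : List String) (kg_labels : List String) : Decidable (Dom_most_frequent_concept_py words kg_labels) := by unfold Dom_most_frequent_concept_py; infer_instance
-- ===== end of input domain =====

-- B replaces A's dict + descending-frequency sort + early-exit scan by a filter of the distinct
-- meaningful words plus a single first-maximum reduction (same values, same tie-breaking); objective: simpler.

-- shared helper: str.title(), exact on the ASCII domain (cased chars there are exactly a-z/A-Z)
def pvIsAlpha (c : Char) : Bool := ('a' ≤ c && c ≤ 'z') || ('A' ≤ c && c ≤ 'Z')
def pvLowC (c : Char) : Char := if 'A' ≤ c && c ≤ 'Z' then Char.ofNat (c.toNat + 32) else c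
def pvUpC (c : Char) : Char := if 'a' ≤ c && c ≤ 'z' then Char.ofNat (c.toNat - 32) else c
def pvTitleChars : List Char → Bool → List Char
  | [], _ => []
  | c :: cs, prevCased =>
      (if pvIsAlpha c then (if prevCased then pvLowC c else pvUpC c) else c) :: pvTitleChars cs (pvIsAlpha c)
def pvTitle (s : String) : String := String.ofList (pvTitleChars s.toList false)

-- shared helper: the stopword set literal both Pythons build
def pvStopwords : PySem.Set String := PySem.Set.ofList
  ["which", "where", "there", "their", "these", "those",
   "about", "using", "based", "level", "system", "data",
   "that", "with", "from", "have", "been", "this", "into"]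

-- ===== PORT A =====
def most_frequent_concept_py (words : List String) (kg_labels : List String) : String :=
  if words = [] then ""
  else
    let freq : PySem.Dict String Int :=
      words.foldl (fun d w => if !PySem.Set.contains pvStopwords w then d.insert w (d.getD w 0 + 1) else d)
        PySem.Dict.empty
    if freq.items = [] then ""
    else
      match (PySem.List.sorted freq.items (fun x => -x.2)).find?
              (fun p => kg_labels.any (fun label => PySem.Str.isIn p.1 label)) with
      | some p => pvTitle p.1
      | none =>
        match PySem.List.max? freq.keys (fun k => freq.getD k 0) with
        | some w => pvTitle w
        | none => ""   -- unreachable: freq is non-empty here (Python's max would raise on empty)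

-- ===== PORT B =====
def most_frequent_concept_py_alt (words : List String) (kg_labels : List String) : String :=
  if words = [] then ""
  else
    let filtered := words.filter (fun w => !PySem.Set.contains pvStopwords w)
    if filtered = [] then ""
    else
      let freq : PySem.Dict String Int :=
        filtered.foldl (fun d w => d.insert w (d.getD w 0 + 1)) PySem.Dict.empty
      let matching := freq.keys.filter (fun w => kg_labels.any (fun label => PySem.Str.isIn w label))
      let pool := if matching = [] then freq.keys else matching
      match PySem.List.max? pool (fun w => freq.getD w 0) with
      | some w => pvTitle w
      | none => ""   -- unreachable: pool is non-empty here (Python's max would raise on empty)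

-- ===== PRECONDITION & SPEC =====
def Spec_most_frequent_concept_py (words : List String) (kg_labels : List String) (out : String) : Prop := out = most_frequent_concept_py_alt words kg_labels
instance (words : List String) (kg_labels : List String) (out : String) : Decidable (Spec_most_frequent_concept_py words kg_labels out) := by unfold Spec_most_frequent_concept_py; infer_instance

-- ===== CLAIM (what is proved, stated in full; the proofs are below) =====
def Claim_equal_most_frequent_concept_py : Prop := ∀ (words : List String) (kg_labels : List String), Dom_most_frequent_concept_py words kg_labels → Spec_most_frequent_concept_py words kg_labels (most_frequent_concept_py words kg_labels)

-- ===== LEMMAS AND PROOFS =====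

-- the counting step A's loop performs on a non-stopword
def pvStep (d : PySem.Dict String Int) (w : String) : PySem.Dict String Int :=
  d.insert w (d.getD w 0 + 1)


lemma pv_max?_map {α β : Type} (f : α → β) (key : β → Int) (l : List α) :
    PySem.List.max? (l.map f) key = (PySem.List.max? l (fun a => key (f a))).map f := by
  unfold PySem.List.max?
  rw [List.foldl_map]
  suffices h : ∀ (l : List α) (acc : Option α),
      List.foldl (fun acc x => match acc with | none => some (f x) | some m => if key m < key (f x) then some (f x) else some m) (acc.map f) l
        = (List.foldl (fun acc x => match acc with | none => some x | some m => if key (f m) < key (f x) then some x else some m) acc l).map f by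
    simpa using h l none
  intro l
  induction l with
  | nil => intro acc; rfl
  | cons x t ih =>
    intro acc
    cases acc with
    | none => simpa using ih (some x)
    | some m =>
      simp only [List.foldl_cons, Option.map_some]
      by_cases h : key (f m) < key (f x)
      · simp only [if_pos h]; simpa using ih (some x)
      · simp only [if_neg h]; simpa using ih (some m)

lemma pv_max?_congr {α : Type} (k1 k2 : α → Int) (l : List α)
    (h : ∀ x ∈ l, k1 x = k2 x) : PySem.List.max? l k1 = PySem.List.max? l k2 := by
  unfold PySem.List.max?
  suffices hgen : ∀ (l : List α), (∀ x ∈ l, k1 x = k2 x) → ∀ (acc : Option α), (∀ m, acc = some m → k1 m = k2 m) →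
      List.foldl (fun acc x => match acc with | none => some x | some m => if k1 m < k1 x then some x else some m) acc l
        = List.foldl (fun acc x => match acc with | none => some x | some m => if k2 m < k2 x then some x else some m) acc l by
    exact hgen l h none (by simp)
  intro l
  induction l with
  | nil => intro _ acc _; rfl
  | cons x t ih =>
    intro hmem acc hacc
    cases acc with
    | none =>
      simp only [List.foldl_cons]
      exact ih (fun y hy => hmem y (by simp [hy])) (some x) (by intro m hm; cases hm; exact hmem x (by simp))
    | some m =>
      simp only [List.foldl_cons]
      rw [hacc m rfl, hmem x (by simp)]
      split
      · exact ih (fun y hy => hmem y (by simp [hy])) (some x) (by intro m' hm'; cases hm'; exact hmem x (by simp))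
      · exact ih (fun y hy => hmem y (by simp [hy])) (some m) (by intro m' hm'; cases hm'; exact hacc m rfl)

lemma pv_max?_eq_none_iff {α : Type} (key : α → Int) (l : List α) :
    PySem.List.max? l key = none ↔ l = [] := by
  unfold PySem.List.max?
  constructor
  · intro h
    cases l with
    | nil => rfl
    | cons x t =>
      exfalso
      suffices hm : ∀ (t : List α) (m : α), List.foldl (fun acc x => match acc with | none => some x | some m => if key m < key x then some x else some m) (some m) t ≠ none by
        simpa using hm t x h
      intro t
      induction t with
      | nil => simp
      | cons y ty ih => intro m; simp only [List.foldl_cons]; split <;> apply ih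
  · rintro rfl; rfl

lemma pv_ofList_eq_nil_iff {α : Type} [BEq α] [LawfulBEq α] (l : List α) :
    PySem.Set.ofList l = [] ↔ l = [] := by
  constructor
  · intro h
    cases l with
    | nil => rfl
    | cons x t => exfalso; have := (PySem.Set.mem_ofList (x :: t) x).2 (by simp); rw [h] at this; simp at this
  · rintro rfl; rfl

def pvCombine {α : Type} (key : α → Int) (P : α → Bool) (r : Option α) (x : α) : Option α :=
  if P x then
    match r with
    | none => some x
    | some m => if key m < key x then some x else some m
  else r

lemma pv_find?_insertBy {α : Type} (key : α → Int) (P : α → Bool) (x : α) (s : List α)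
    (hs : s.Pairwise (fun a b => key b ≤ key a)) :
    (PySem.List.insertBy (fun a b => decide (-key a < -key b)) x s).find? P
      = pvCombine key P (s.find? P) x := by
  induction s with
  | nil =>
    show (List.find? P [x]) = pvCombine key P none x
    cases hPx : P x <;> simp [List.find?, pvCombine, hPx]
  | cons y ys ih =>
    have hpw : ys.Pairwise (fun a b => key b ≤ key a) := hs.tail
    have hy : ∀ z ∈ ys, key z ≤ key y := fun z hz => (List.pairwise_cons.1 hs).1 z hz
    rw [show PySem.List.insertBy (fun a b => decide (-key a < -key b)) x (y :: ys)
          = if (-key x < -key y : Prop) then x :: y :: ys else y :: PySem.List.insertBy (fun a b => decide (-key a < -key b)) x ys from by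
      simp [PySem.List.insertBy]]
    by_cases hcmp : (-key x < -key y : Prop)
    · rw [if_pos hcmp]
      have hky : key y < key x := by omega
      cases hPx : P x with
      | true =>
        rw [show List.find? P (x :: y :: ys) = some x from by simp [List.find?, hPx]]
        simp only [pvCombine, hPx, if_pos]
        cases hfind : List.find? P (y :: ys) with
        | none => rfl
        | some m =>
          have hm : m ∈ y :: ys := List.mem_of_find?_eq_some hfind
          have hkm : key m ≤ key y := by
            rcases List.mem_cons.1 hm with rfl | hm'
            · exact le_refl _
            · exact hy m hm'
          exact (if_pos (show key m < key x by omega)).symm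
      | false =>
        rw [show List.find? P (x :: y :: ys) = List.find? P (y :: ys) from by simp [List.find?, hPx]]
        simp [pvCombine, hPx]
    · rw [if_neg hcmp]
      have hxy : key x ≤ key y := by omega
      cases hPy : P y with
      | true =>
        rw [show List.find? P (y :: PySem.List.insertBy (fun a b => decide (-key a < -key b)) x ys) = some y from by simp [List.find?, hPy],
            show List.find? P (y :: ys) = some y from by simp [List.find?, hPy]]
        cases hPx : P x with
        | true =>
          show some y = pvCombine key P (some y) x
          simp only [pvCombine, hPx, if_pos]
          exact (if_neg (show ¬ key y < key x by omega)).symm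
        | false => simp [pvCombine, hPx]
      | false =>
        rw [show List.find? P (y :: PySem.List.insertBy (fun a b => decide (-key a < -key b)) x ys)
              = List.find? P (PySem.List.insertBy (fun a b => decide (-key a < -key b)) x ys) from by simp [List.find?, hPy],
            show List.find? P (y :: ys) = List.find? P ys from by simp [List.find?, hPy]]
        exact ih hpw

lemma pv_find?_sorted {α : Type} (key : α → Int) (P : α → Bool) (l : List α) :
    (PySem.List.sorted l (fun a => -key a)).find? P = PySem.List.max? (l.filter P) key := by
  induction l using List.reverseRecOn with
  | nil => rfl
  | append_singleton t x ih =>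
    have hsor : PySem.List.sorted (t ++ [x]) (fun a => -key a)
        = PySem.List.insertBy (fun a b => decide (-key a < -key b)) x (PySem.List.sorted t (fun a => -key a)) := by
      rw [PySem.List.sorted_eq_foldl_insertBy, PySem.List.sorted_eq_foldl_insertBy, List.foldl_append]
      rfl
    have hpw : (PySem.List.sorted t (fun a => -key a)).Pairwise (fun a b => key b ≤ key a) := by
      have := PySem.List.sorted_pairwise t (fun a => -key a)
      exact this.imp (by intro a b h; omega)
    rw [hsor, pv_find?_insertBy key P x _ hpw, ih]
    rw [List.filter_append]
    cases hPx : P x with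
    | true =>
      rw [show List.filter P [x] = [x] from by simp [hPx]]
      unfold PySem.List.max? pvCombine
      rw [List.foldl_append]
      simp only [hPx, if_pos, List.foldl_cons, List.foldl_nil]
      cases List.foldl (fun acc x => match acc with | none => some x | some m => if key m < key x then some x else some m) none (List.filter P t) <;> rfl
    | false =>
      rw [show List.filter P [x] = [] from by simp [hPx]]
      simp [pvCombine, hPx]

lemma pv_keys_char (l : List String) (h : (l.foldl pvStep PySem.Dict.empty).items = (PySem.Set.ofList l).map (fun w => (w, (List.count w l : Int)))) :
    (l.foldl pvStep PySem.Dict.empty).keys = PySem.Set.ofList l := by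
  unfold PySem.Dict.keys
  rw [h, List.map_map]
  exact List.map_id _

lemma pv_items_char (l : List String) :
    (l.foldl pvStep PySem.Dict.empty).items
      = (PySem.Set.ofList l).map (fun w => (w, (List.count w l : Int))) := by
  induction l using List.reverseRecOn with
  | nil => rfl
  | append_singleton t x ih =>
    rw [List.foldl_append, List.foldl_cons, List.foldl_nil]
    have hkeys := pv_keys_char t ih
    have hnodup : (t.foldl pvStep PySem.Dict.empty).keys.Nodup := by
      rw [hkeys]; exact PySem.Set.nodup_ofList t
    have hofl : PySem.Set.ofList (t ++ [x])
        = if x ∈ t then PySem.Set.ofList t else PySem.Set.ofList t ++ [x] := by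
      rw [PySem.Set.ofList_eq_foldl, List.foldl_append, ← PySem.Set.ofList_eq_foldl]
      show PySem.Set.add (PySem.Set.ofList t) x = _
      unfold PySem.Set.add
      by_cases hx : x ∈ t
      · rw [if_pos hx, if_pos (by rw [PySem.Set.contains_iff]; exact (PySem.Set.mem_ofList t x).2 hx)]
      · rw [if_neg hx, if_neg (by rw [PySem.Set.contains_eq_listContains]; simp [PySem.Set.mem_ofList, hx])]
    by_cases hx : x ∈ t
    · -- x already a key: insert overwrites in place
      have hcont : (t.foldl pvStep PySem.Dict.empty).contains x = true := by
        rw [PySem.Dict.contains_iff_mem_keys, hkeys]; exact (PySem.Set.mem_ofList t x).2 hx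
      have hgetD : (t.foldl pvStep PySem.Dict.empty).getD x 0 = (List.count x t : Int) := by
        have hmem : (x, (List.count x t : Int)) ∈ (t.foldl pvStep PySem.Dict.empty).items := by
          rw [ih]; exact List.mem_map.2 ⟨x, (PySem.Set.mem_ofList t x).2 hx, rfl⟩
        rw [PySem.Dict.getD_eq_get?_getD, PySem.Dict.get?_of_mem_items _ hmem hnodup]
        rfl
      show ((t.foldl pvStep PySem.Dict.empty).insert x ((t.foldl pvStep PySem.Dict.empty).getD x 0 + 1)).items = _
      rw [PySem.Dict.items_insert_of_contains _ _ hcont, hgetD, ih, hofl, if_pos hx, List.map_map]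
      apply List.map_congr_left
      intro w hw
      by_cases hwx : w = x
      · subst hwx
        simp [List.count_append]
      · simp only [Function.comp_apply, beq_iff_eq, hwx, if_false]
        have : List.count w (t ++ [x]) = List.count w t := by
          simp [List.count_append, Ne.symm hwx]
        rw [this]
    · have hcont : (t.foldl pvStep PySem.Dict.empty).contains x = false := by
        rw [← Bool.not_eq_true, PySem.Dict.contains_iff_mem_keys, hkeys]
        simp [PySem.Set.mem_ofList, hx]
      have hgetD : (t.foldl pvStep PySem.Dict.empty).getD x 0 = 0 :=
        PySem.Dict.getD_of_not_contains _ _ hcont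
      show ((t.foldl pvStep PySem.Dict.empty).insert x ((t.foldl pvStep PySem.Dict.empty).getD x 0 + 1)).items = _
      rw [PySem.Dict.items_insert_of_not_contains _ _ hcont, hgetD, ih, hofl, if_neg hx, List.map_append]
      congr 1
      · apply List.map_congr_left
        intro w hw
        have hwx : w ≠ x := by
          intro h; subst h; exact hx ((PySem.Set.mem_ofList t w).1 hw)
        have : List.count w (t ++ [x]) = List.count w t := by
          simp [List.count_append, Ne.symm hwx]
        rw [this]
      · have hcx : List.count x t = 0 := List.count_eq_zero.2 hx
        simp [List.count_append, hcx]

lemma pv_getD_char (l : List String) (w : String) (hw : w ∈ PySem.Set.ofList l) :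
    (l.foldl pvStep PySem.Dict.empty).getD w 0 = (List.count w l : Int) := by
  have hmem : (w, (List.count w l : Int)) ∈ (l.foldl pvStep PySem.Dict.empty).items := by
    rw [pv_items_char]; exact List.mem_map.2 ⟨w, hw, rfl⟩
  have hnodup := pv_keys_char l (pv_items_char l)
  rw [PySem.Dict.getD_eq_get?_getD, PySem.Dict.get?_of_mem_items _ hmem (by rw [hnodup]; exact PySem.Set.nodup_ofList l)]
  rfl

lemma pv_foldl_filter (stop : PySem.Set String) (l : List String) (d : PySem.Dict String Int) :
    l.foldl (fun d w => if !PySem.Set.contains stop w then d.insert w (d.getD w 0 + 1) else d) d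
      = (l.filter (fun w => !PySem.Set.contains stop w)).foldl pvStep d := by
  induction l generalizing d with
  | nil => rfl
  | cons x t ih =>
    rw [List.foldl_cons, List.filter_cons]
    by_cases hx : (!PySem.Set.contains stop x) = true
    · rw [if_pos hx, if_pos hx, List.foldl_cons, ih]; rfl
    · rw [if_neg hx, if_neg hx, ih]

-- ===== VERDICT (by name: the statement is the Claim_ definition above) =====
theorem most_frequent_concept_py_spec : Claim_equal_most_frequent_concept_py := by
  intro words kg_labels _dom
  unfold Spec_most_frequent_concept_py
  unfold most_frequent_concept_py most_frequent_concept_py_alt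
  by_cases hw : words = []
  · rw [if_pos hw, if_pos hw]
  rw [if_neg hw, if_neg hw]
  rw [pv_foldl_filter]
  set S := words.filter (fun w => !PySem.Set.contains pvStopwords w) with hS
  have hitems := pv_items_char S
  have hkeys := pv_keys_char S hitems
  by_cases hSnil : S = []
  · rw [if_pos (by rw [hitems, hSnil]; rfl), if_pos hSnil]
  rw [if_neg (by rw [hitems]; simp [pv_ofList_eq_nil_iff, hSnil]), if_neg hSnil]
  rw [hitems]
  rw [pv_find?_sorted (fun p : String × Int => p.2) (fun p => kg_labels.any (fun label => PySem.Str.isIn p.1 label))]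
  rw [List.filter_map, pv_max?_map]
  set uniq := PySem.Set.ofList S with huniq
  set matching := uniq.filter (fun w => kg_labels.any (fun label => PySem.Str.isIn w label)) with hmatching
  have hfall : PySem.List.max? (List.foldl pvStep PySem.Dict.empty S).keys (fun k => (List.foldl pvStep PySem.Dict.empty S).getD k 0)
      = PySem.List.max? uniq (fun w => ((PySem.List.count S w : Nat) : Int)) := by
    rw [hkeys]
    exact pv_max?_congr _ _ _ (fun x hx => by rw [pv_getD_char S x (by rw [← huniq]; exact hx)]; rfl)
  rw [hfall]
  show (match (PySem.List.max? matching (fun w => ((PySem.List.count S w : Nat) : Int))).map (fun w => (w, ((List.count w S : Nat) : Int))) with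
        | some p => pvTitle p.1
        | none => match PySem.List.max? uniq (fun w => ((PySem.List.count S w : Nat) : Int)) with | some w => pvTitle w | none => "")
      = (match PySem.List.max?
            (if (List.foldl pvStep PySem.Dict.empty S).keys.filter (fun w => kg_labels.any (fun label => PySem.Str.isIn w label)) = []
             then (List.foldl pvStep PySem.Dict.empty S).keys
             else (List.foldl pvStep PySem.Dict.empty S).keys.filter (fun w => kg_labels.any (fun label => PySem.Str.isIn w label)))
            (fun w => (List.foldl pvStep PySem.Dict.empty S).getD w 0) with
          | some w => pvTitle w | none => "")
  rw [hkeys, ← hmatching]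
  have hpool : ∀ (pool : List String), (∀ x ∈ pool, x ∈ uniq) →
      PySem.List.max? pool (fun w => (List.foldl pvStep PySem.Dict.empty S).getD w 0)
        = PySem.List.max? pool (fun w => ((PySem.List.count S w : Nat) : Int)) :=
    fun pool hsub => pv_max?_congr _ _ _ (fun x hx => by rw [pv_getD_char S x (hsub x hx)]; rfl)
  by_cases hm : matching = []
  · rw [if_pos hm, hpool uniq (fun x hx => hx), hm]
    rfl
  · rw [if_neg hm, hpool matching (fun x hx => by rw [hmatching] at hx; exact (List.mem_filter.1 hx).1)]
    obtain ⟨w, hw⟩ : ∃ w, PySem.List.max? matching (fun w => ((PySem.List.count S w : Nat) : Int)) = some w := by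
      cases hq : PySem.List.max? matching (fun w => ((PySem.List.count S w : Nat) : Int)) with
      | none => exact absurd ((pv_max?_eq_none_iff _ _).1 hq) hm
      | some w => exact ⟨w, rfl⟩
    rw [hw]
    rfl
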